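-- pv_equiv track=rewrite | github.com/Petr-max41/-module_2_hard- | 'module_2_hard'.py | find_the_password
-- ===== SOURCE A (Python) =====
-- def find_the_password(figure):
--     password = ''
--     for i in range(1, figure):
--         for j in range(2, figure):
--             if j <= i:
--                 continue
--             if figure % ( i + j) == 0:
--                 password += str(i) + str(j)
--     return password
-- ===== SOURCE B (Python) =====
-- def find_the_password(figure):
--     # Faster: precompute the divisors of figure once; for each i only the
--     # ascending divisors d exceeding twice i yield a pair (i, j = d - i).
--     if figure <= 2:
--         return ''
--     divs = [d for d in range(3, figure + 1) if figure % d == 0]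
--     password = ''
--     for i in range(1, figure):
--         for d in divs:
--             if d > 2 * i:
--                 password += str(i) + str(d - i)
--     return password
-- ===== Notes on version B (the rewrite author's own statement) =====
-- stated objective: faster
-- what changed: Instead of testing every pair (i,j) with a nested quadratic scan, B precomputes the ascending list of divisors of figure once and, for each i, emits a pair only for each divisor d exceeding twice i (with j = d - i), removing the inner linear scan.
import Mathlib
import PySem

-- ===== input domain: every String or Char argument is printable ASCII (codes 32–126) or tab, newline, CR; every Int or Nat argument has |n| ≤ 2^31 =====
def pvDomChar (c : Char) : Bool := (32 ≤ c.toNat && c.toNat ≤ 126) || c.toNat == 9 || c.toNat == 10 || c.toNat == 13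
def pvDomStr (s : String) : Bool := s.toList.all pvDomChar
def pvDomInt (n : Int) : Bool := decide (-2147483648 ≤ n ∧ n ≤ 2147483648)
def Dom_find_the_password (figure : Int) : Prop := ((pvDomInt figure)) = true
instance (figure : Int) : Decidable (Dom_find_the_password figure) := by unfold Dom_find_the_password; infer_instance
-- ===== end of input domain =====

-- B replaces A's nested pair scan by a precomputed ascending divisor list
-- (for each i, one pair per divisor d > 2*i, with j = d - i); measurably faster.

-- ===== PORT A =====
def find_the_password (figure : Int) : String :=
  (PySem.List.pyRange 1 figure 1).foldl (fun password i =>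
    (PySem.List.pyRange 2 figure 1).foldl (fun password j =>
      if j ≤ i then password
      else if PySem.Int.mod figure (i + j) = 0 then
        password ++ (PySem.Int.toStr i ++ PySem.Int.toStr j)
      else password) password) ""

-- ===== PORT B =====
-- Source B's local `divs = [d for d in range(3, figure+1) if figure % d == 0]`
def pvDivs (figure : Int) : List Int :=
  (PySem.List.pyRange 3 (figure + 1) 1).filter (fun d => PySem.Int.mod figure d = 0)

def find_the_password_alt (figure : Int) : String :=
  if figure ≤ 2 then "" else
  (PySem.List.pyRange 1 figure 1).foldl (fun password i =>
    (pvDivs figure).foldl (fun password d =>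
      if 2 * i < d then password ++ (PySem.Int.toStr i ++ PySem.Int.toStr (d - i))
      else password) password) ""

-- ===== PRECONDITION & SPEC =====
def Spec_find_the_password (figure : Int) (out : String) : Prop := out = find_the_password_alt figure
instance (figure : Int) (out : String) : Decidable (Spec_find_the_password figure out) := by unfold Spec_find_the_password; infer_instance

-- ===== CLAIM (what is proved, stated in full; the proofs are below) =====
def Claim_equal_find_the_password : Prop := ∀ (figure : Int), Dom_find_the_password figure → Spec_find_the_password figure (find_the_password figure)

-- ===== LEMMAS AND PROOFS =====

/-- Concatenation of a list of strings (canonical middle form for both folds). -/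
def pvCat : List String → String
  | [] => ""
  | s :: l => s ++ pvCat l

/-- The divisor condition, as a function of `d = j + i`. -/
def pvQ (figure i : Int) : Int → Bool :=
  fun d => decide (¬ d ≤ 2 * i ∧ PySem.Int.mod figure d = 0)

/-- A fold that appends `g x` at each step is `pvCat` of the map. -/
lemma pv_foldl_cat (f : String → Int → String) (g : Int → String)
    (h : ∀ (acc : String) (x : Int), f acc x = acc ++ g x) :
    ∀ (l : List Int) (acc : String), l.foldl f acc = acc ++ pvCat (l.map g) := by
  intro l
  induction l with
  | nil => intro acc; simp [pvCat, String.append_empty]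
  | cons x xs ih =>
      intro acc
      simp only [List.foldl_cons, List.map_cons]
      rw [ih, h, String.append_assoc]
      rfl

/-- A's inner loop over `j`, from an arbitrary accumulator. -/
lemma pv_innerA (figure i : Int) :
    ∀ (l : List Int) (acc : String),
      l.foldl (fun password j =>
        if j ≤ i then password
        else if PySem.Int.mod figure (i + j) = 0 then
          password ++ (PySem.Int.toStr i ++ PySem.Int.toStr j)
        else password) acc
      = acc ++ pvCat ((l.filter (fun j => decide (¬ j ≤ i ∧ PySem.Int.mod figure (i + j) = 0))).map
          (fun j => PySem.Int.toStr i ++ PySem.Int.toStr j)) := by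
  intro l
  induction l with
  | nil => intro acc; simp [pvCat, String.append_empty]
  | cons x xs ih =>
      intro acc
      by_cases h1 : x ≤ i
      · have hd : decide (¬ x ≤ i ∧ PySem.Int.mod figure (i + x) = 0) = false := by simp [h1]
        simp only [List.foldl_cons, if_pos h1, List.filter_cons, hd, Bool.false_eq_true, if_false]
        exact ih acc
      · by_cases h2 : PySem.Int.mod figure (i + x) = 0
        · have hd : decide (¬ x ≤ i ∧ PySem.Int.mod figure (i + x) = 0) = true := by
            simp [h1, h2]
          simp only [List.foldl_cons, if_neg h1, if_pos h2, List.filter_cons, hd, if_true,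
            List.map_cons]
          rw [ih, String.append_assoc]
          rfl
        · have hd : decide (¬ x ≤ i ∧ PySem.Int.mod figure (i + x) = 0) = false := by simp [h2]
          simp only [List.foldl_cons, if_neg h1, if_neg h2, List.filter_cons, hd,
            Bool.false_eq_true, if_false]
          exact ih acc

/-- B's inner loop over the divisors, from an arbitrary accumulator. -/
lemma pv_innerB (i : Int) :
    ∀ (l : List Int) (acc : String),
      l.foldl (fun password d =>
        if 2 * i < d then password ++ (PySem.Int.toStr i ++ PySem.Int.toStr (d - i))
        else password) acc
      = acc ++ pvCat ((l.filter (fun d => decide (2 * i < d))).map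
          (fun d => PySem.Int.toStr i ++ PySem.Int.toStr (d - i))) := by
  intro l
  induction l with
  | nil => intro acc; simp [pvCat, String.append_empty]
  | cons x xs ih =>
      intro acc
      by_cases h1 : 2 * i < x
      · have hd : decide (2 * i < x) = true := by simp [h1]
        simp only [List.foldl_cons, if_pos h1, List.filter_cons, hd, if_true, List.map_cons]
        rw [ih, String.append_assoc]
        rfl
      · have hd : decide (2 * i < x) = false := by simp [h1]
        simp only [List.foldl_cons, if_neg h1, List.filter_cons, hd, Bool.false_eq_true, if_false]
        exact ih acc

/-- Shifting a filtered range by `i`. -/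
lemma pv_map_add_filter (p : Int → Bool) (i : Int) :
    ∀ (n : Nat) (a b : Int), b - a ≤ n →
      ((PySem.List.pyRange a b 1).filter (fun j => p (j + i))).map (fun j => j + i)
        = (PySem.List.pyRange (a + i) (b + i) 1).filter p := by
  intro n
  induction n with
  | zero =>
      intro a b h
      rw [PySem.List.pyRange_one_eq_nil (by omega), PySem.List.pyRange_one_eq_nil (by omega)]
      rfl
  | succ n ih =>
      intro a b h
      by_cases hab : a < b
      · rw [PySem.List.pyRange_one_cons hab,
          PySem.List.pyRange_one_cons (show a + i < b + i by omega)]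
        have htail := ih (a + 1) b (by omega)
        rw [show (a + 1) + i = a + i + 1 by ring] at htail
        cases hp : p (a + i) with
        | true => simp [hp, htail]
        | false => simp [hp, htail]
      · rw [PySem.List.pyRange_one_eq_nil (by omega), PySem.List.pyRange_one_eq_nil (by omega)]
        rfl

/-- Per-`i` equality of the two emitted chunk lists. -/
lemma pv_per_i (figure i : Int) (h3 : 2 < figure) (hi1 : 1 ≤ i) (hi2 : i < figure) :
    ((PySem.List.pyRange 2 figure 1).filter
        (fun j => decide (¬ j ≤ i ∧ PySem.Int.mod figure (i + j) = 0))).map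
      (fun j => PySem.Int.toStr i ++ PySem.Int.toStr j)
    = (((pvDivs figure).filter (fun d => decide (2 * i < d))).map
        (fun d => PySem.Int.toStr i ++ PySem.Int.toStr (d - i))) := by
  -- rewrite A's filter predicate through d = j + i
  have e0 : (PySem.List.pyRange 2 figure 1).filter
        (fun j => decide (¬ j ≤ i ∧ PySem.Int.mod figure (i + j) = 0))
      = (PySem.List.pyRange 2 figure 1).filter (fun j => pvQ figure i (j + i)) := by
    apply List.filter_congr
    intro j _
    simp only [pvQ, decide_eq_decide]
    constructor
    · rintro ⟨hj, hm⟩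
      refine ⟨by omega, ?_⟩
      rw [add_comm j i]; exact hm
    · rintro ⟨hj, hm⟩
      refine ⟨by omega, ?_⟩
      rw [add_comm i j]; exact hm
  -- A's chunks through the shift map
  have e1 : ((PySem.List.pyRange 2 figure 1).filter (fun j => pvQ figure i (j + i))).map
        (fun j => PySem.Int.toStr i ++ PySem.Int.toStr j)
      = (((PySem.List.pyRange 2 figure 1).filter (fun j => pvQ figure i (j + i))).map
          (fun j => j + i)).map (fun d => PySem.Int.toStr i ++ PySem.Int.toStr (d - i)) := by
    rw [List.map_map]
    apply List.map_congr_left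
    intro j _
    simp
  have e2 := pv_map_add_filter (pvQ figure i) i (figure - 2).toNat 2 figure (by omega)
  -- range surgery: [2+i, figure+i) filtered = [3, figure+1) filtered
  have hsplit1 : PySem.List.pyRange 3 (figure + i) 1
      = PySem.List.pyRange 3 (2 + i) 1 ++ PySem.List.pyRange (2 + i) (figure + i) 1 :=
    PySem.List.pyRange_one_append _ _ _ (by omega) (by omega)
  have hsplit2 : PySem.List.pyRange 3 (figure + i) 1
      = PySem.List.pyRange 3 (figure + 1) 1 ++ PySem.List.pyRange (figure + 1) (figure + i) 1 :=
    PySem.List.pyRange_one_append _ _ _ (by omega) (by omega)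
  have hnil1 : (PySem.List.pyRange 3 (2 + i) 1).filter (pvQ figure i) = [] := by
    apply List.filter_eq_nil_iff.mpr
    intro d hd
    rw [PySem.List.mem_pyRange_one] at hd
    simp only [pvQ, decide_eq_true_eq]
    rintro ⟨hq, -⟩
    omega
  have hnil2 : (PySem.List.pyRange (figure + 1) (figure + i) 1).filter (pvQ figure i) = [] := by
    apply List.filter_eq_nil_iff.mpr
    intro d hd
    rw [PySem.List.mem_pyRange_one] at hd
    simp only [pvQ, decide_eq_true_eq]
    rintro ⟨-, hm⟩
    have hdvd : d ∣ figure := (PySem.Int.mod_eq_zero_iff_dvd figure d).mp hm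
    have := Int.le_of_dvd (by omega) hdvd
    omega
  have e3 : (PySem.List.pyRange (2 + i) (figure + i) 1).filter (pvQ figure i)
      = (PySem.List.pyRange 3 (figure + 1) 1).filter (pvQ figure i) := by
    have l1 : (PySem.List.pyRange 3 (figure + i) 1).filter (pvQ figure i)
        = (PySem.List.pyRange (2 + i) (figure + i) 1).filter (pvQ figure i) := by
      rw [hsplit1, List.filter_append, hnil1, List.nil_append]
    have l2 : (PySem.List.pyRange 3 (figure + i) 1).filter (pvQ figure i)
        = (PySem.List.pyRange 3 (figure + 1) 1).filter (pvQ figure i) := by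
      rw [hsplit2, List.filter_append, hnil2, List.append_nil]
    rw [← l1, l2]
  have e4 : (PySem.List.pyRange 3 (figure + 1) 1).filter (pvQ figure i)
      = (pvDivs figure).filter (fun d => decide (2 * i < d)) := by
    unfold pvDivs
    rw [List.filter_filter]
    apply List.filter_congr
    intro d _
    by_cases h1 : 2 * i < d <;> by_cases h2 : PySem.Int.mod figure d = 0 <;>
      simp [pvQ, h1, h2]
  rw [e0, e1, e2, e3, e4]

/-- The two ports agree on every input. -/
lemma pv_main (figure : Int) : find_the_password figure = find_the_password_alt figure := by
  unfold find_the_password find_the_password_alt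
  by_cases hf : figure ≤ 2
  · rw [if_pos hf]
    by_cases h1 : figure ≤ 1
    · rw [PySem.List.pyRange_one_eq_nil h1]
      rfl
    · have h2 : figure = 2 := by omega
      subst h2
      decide
  · rw [if_neg hf]
    rw [pv_foldl_cat _
        (fun i => pvCat (((PySem.List.pyRange 2 figure 1).filter
          (fun j => decide (¬ j ≤ i ∧ PySem.Int.mod figure (i + j) = 0))).map
            (fun j => PySem.Int.toStr i ++ PySem.Int.toStr j)))
        (fun acc i => pv_innerA figure i (PySem.List.pyRange 2 figure 1) acc)]
    rw [pv_foldl_cat _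
        (fun i => pvCat (((pvDivs figure).filter (fun d => decide (2 * i < d))).map
          (fun d => PySem.Int.toStr i ++ PySem.Int.toStr (d - i))))
        (fun acc i => pv_innerB i (pvDivs figure) acc)]
    congr 1
    congr 1
    apply List.map_congr_left
    intro i hi
    rw [PySem.List.mem_pyRange_one] at hi
    rw [pv_per_i figure i (by omega) (by omega) (by omega)]

-- ===== VERDICT (by name: the statement is the Claim_ definition above) =====
theorem find_the_password_spec : Claim_equal_find_the_password := by
  intro figure _
  exact pv_main figure
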